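-- pv_equiv track=rewrite | github.com/hassanarifbinarif/aisearchbot | asb/priorities.py | has_only_two_top_level_operators
-- ===== SOURCE A (Python) =====
-- def tokenize(query):
--     """
--     Tokenizes the input query, handling quoted phrases and logical operators.
--     """
--     tokens = []
--     i = 0
--     length = len(query)
--     while i < length:
--         if query[i] in '()"':
--             if query[i] == '"':
--                 end_quote = query.find('"', i + 1)
--                 if end_quote == -1:
--                     end_quote = length
--                 tokens.append(query[i:end_quote + 1])
--                 i = end_quote + 1
--             else:
--                 tokens.append(query[i])
--                 i += 1
--         elif query[i].isspace():
--             i += 1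
--         else:
--             end = i
--             while end < length and not query[end].isspace() and query[end] not in '()"':
--                 end += 1
--             tokens.append(query[i:end])
--             i = end
--     return tokens
--
-- def has_only_two_top_level_operators(query):
--     """
--     Check if the query contains only two operators at the topmost level.
--     Operators include AND, OR, and NOT.
--     Returns True if there are only two operators, False otherwise.
--     """
--     tokens = tokenize(query)
--     top_level_operators = []
--     parentheses_level = 0
--
--     for token in tokens:
--         if token == '(':
--             parentheses_level += 1
--         elif token == ')':
--             parentheses_level -= 1
--         elif parentheses_level == 0 and token.upper() in ['AND', 'OR', 'NOT']:
--             top_level_operators.append(token.upper())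
--
--     return len(top_level_operators) == 2
-- ===== SOURCE B (Python) =====
-- def has_only_two_top_level_operators(query):
--     """Single-pass character scanner: no token list, just a paren level and an operator count."""
--     n = len(query)
--     level = 0
--     count = 0
--     i = 0
--     while i < n:
--         c = query[i]
--         if c == '"':
--             nxt = query.find('"', i + 1)
--             i = n if nxt == -1 else nxt + 1
--         elif c == '(':
--             level += 1
--             i += 1
--         elif c == ')':
--             level -= 1
--             i += 1
--         elif c.isspace():
--             i += 1
--         else:
--             j = i + 1
--             while j < n and not query[j].isspace() and query[j] not in '()"':
--                 j += 1
--             if level == 0 and query[i:j].upper() in ('AND', 'OR', 'NOT'):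
--                 count += 1
--             i = j
--     return count == 2
-- ===== Notes on version B (the rewrite author's own statement) =====
-- stated objective: simpler
-- what changed: B replaces A's two-phase tokenize-into-a-list-then-fold with a single fused character scan that keeps only the parentheses level and an operator count, never materialising tokens or the operator list.
import Mathlib
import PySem

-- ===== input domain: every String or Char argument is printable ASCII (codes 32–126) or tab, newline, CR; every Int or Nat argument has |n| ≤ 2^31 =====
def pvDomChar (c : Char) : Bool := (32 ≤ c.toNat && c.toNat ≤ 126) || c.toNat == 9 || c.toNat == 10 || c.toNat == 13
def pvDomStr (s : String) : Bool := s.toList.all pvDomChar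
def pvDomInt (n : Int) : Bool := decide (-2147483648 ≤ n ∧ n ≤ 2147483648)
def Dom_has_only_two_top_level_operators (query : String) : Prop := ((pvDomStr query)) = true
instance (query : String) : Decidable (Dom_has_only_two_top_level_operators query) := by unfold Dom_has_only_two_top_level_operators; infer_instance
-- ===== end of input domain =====

-- B fuses A's tokenize-then-fold into one character scan keeping only the paren level and an operator count (no token list); return value only, no side effects.


-- ===== PORT A =====
-- `query[i] in '()"'`
def pvSpecial (c : Char) : Bool := c = '(' || c = ')' || c = '"'

-- A's tokenize: the while loop over the index i becomes the obvious recursion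
-- consuming the yet-unread suffix of the character list (i only moves forward).
def pvTokenize : List Char → List (List Char)
  | [] => []
  | c :: rest =>
    if pvSpecial c then
      if c = '"' then
        -- query.find('"', i+1): the chars before the next '"' in rest
        let content := rest.takeWhile (fun d => !(d = '"'))
        if content.length = rest.length then
          -- end_quote == -1: token runs to the end of the string, i = length + 1
          [c :: content]
        else
          (c :: content ++ ['"']) :: pvTokenize (rest.drop (content.length + 1))
      else
        [c] :: pvTokenize rest
    else if PySem.Chars.isspace c then
      pvTokenize rest
    else
      -- maximal run of non-space, non-'()"' chars (query[i] itself already qualifies)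
      let w := rest.takeWhile (fun d => !PySem.Chars.isspace d && !pvSpecial d)
      (c :: w) :: pvTokenize (rest.drop w.length)
  termination_by l => l.length
  decreasing_by
  all_goals simp

-- the body of A's `for token in tokens` loop; state = (parentheses_level, top_level_operators)
def pvStepA (st : Int × List (List Char)) (tok : List Char) : Int × List (List Char) :=
  if tok = ['('] then (st.1 + 1, st.2)
  else if tok = [')'] then (st.1 - 1, st.2)
  else if st.1 = 0 ∧ PySem.Chars.upper tok ∈ ["AND".toList, "OR".toList, "NOT".toList] then
    (st.1, st.2 ++ [PySem.Chars.upper tok])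
  else st

def has_only_two_top_level_operators (query : String) : Bool :=
  let tokens := pvTokenize query.toList
  let r := tokens.foldl pvStepA ((0 : Int), ([] : List (List Char)))
  r.2.length == 2

-- ===== PORT B =====
-- B's single while loop: scan the unread suffix, carrying level and count.
def pvScanB : List Char → Int → Nat → Nat
  | [], _, count => count
  | c :: rest, level, count =>
    if c = '"' then
      -- nxt = query.find('"', i+1); i = n if nxt == -1 else nxt + 1
      pvScanB ((rest.dropWhile (fun d => !(d = '"'))).drop 1) level count
    else if c = '(' then pvScanB rest (level + 1) count
    else if c = ')' then pvScanB rest (level - 1) count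
    else if PySem.Chars.isspace c then pvScanB rest level count
    else
      let w := rest.takeWhile (fun d => !PySem.Chars.isspace d && !(d = '(' || d = ')' || d = '"'))
      pvScanB (rest.drop w.length)
        level
        (if level = 0 ∧ PySem.Chars.upper (c :: w) ∈ ["AND".toList, "OR".toList, "NOT".toList]
         then count + 1 else count)
  termination_by l => l.length
  decreasing_by
  all_goals simp
  exact Nat.le_succ_of_le (List.length_dropWhile_le _ rest)

def has_only_two_top_level_operators_alt (query : String) : Bool :=
  pvScanB query.toList 0 0 == 2

-- ===== PRECONDITION & SPEC =====
def Spec_has_only_two_top_level_operators (query : String) (out : Bool) : Prop := out = has_only_two_top_level_operators_alt query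
instance (query : String) (out : Bool) : Decidable (Spec_has_only_two_top_level_operators query out) := by unfold Spec_has_only_two_top_level_operators; infer_instance

-- ===== CLAIM (what is proved, stated in full; the proofs are below) =====
def Claim_equal_has_only_two_top_level_operators : Prop := ∀ (query : String), Dom_has_only_two_top_level_operators query → Spec_has_only_two_top_level_operators query (has_only_two_top_level_operators query)

-- ===== LEMMAS AND PROOFS =====

theorem pv_dropWhile_eq_drop (p : Char → Bool) (l : List Char) :
    l.dropWhile p = l.drop (l.takeWhile p).length := by
  induction l with
  | nil => simp
  | cons a l ih => by_cases h : p a <;> simp [h, List.dropWhile, List.takeWhile, ih]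

-- a quoted token (head '"') leaves A's fold state unchanged
theorem pvStepA_quote (st : Int × List (List Char)) (t : List Char) :
    pvStepA st ('"' :: t) = st := by
  have h : PySem.Chars.upper ('"' :: t) = '"' :: PySem.Chars.upper t := by
    simp [PySem.Chars.upper]
    decide
  simp [pvStepA, h]

-- the key invariant: folding A's step over the tokens of cs computes the same
-- operator count as B's fused scan, for any level and any accumulated list
theorem pv_key : ∀ (N : Nat) (cs : List Char), cs.length ≤ N →
    ∀ (level : Int) (ops : List (List Char)),
    ((pvTokenize cs).foldl pvStepA (level, ops)).2.length = pvScanB cs level ops.length := by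
  intro N
  induction N with
  | zero =>
    intro cs h level ops
    have : cs = [] := List.eq_nil_of_length_eq_zero (Nat.le_zero.mp h)
    subst this; simp [pvTokenize, pvScanB]
  | succ N ih =>
    intro cs h level ops
    match cs with
    | [] => simp [pvTokenize, pvScanB]
    | c :: rest =>
      have hr : rest.length ≤ N := by simpa using h
      by_cases hq : c = '"'
      · subst hq
        rw [pvTokenize, pvScanB]
        simp only [pvSpecial, decide_true, Bool.or_true, if_true]
        by_cases hterm : (rest.takeWhile (fun d => !(d = '"'))).length = rest.length
        · -- unterminated quote: both continue with nothing left
          have hdw : rest.dropWhile (fun d => !(d = '"')) = [] := by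
            rw [pv_dropWhile_eq_drop, hterm]; simp
          simp [hterm, hdw, pvStepA_quote, pvScanB]
        · -- closing quote found
          have hdw : (rest.dropWhile (fun d => !(d = '"'))).drop 1
              = rest.drop ((rest.takeWhile (fun d => !(d = '"'))).length + 1) := by
            rw [pv_dropWhile_eq_drop, List.drop_drop]
          have hlen : (rest.drop ((rest.takeWhile (fun d => !(d = '"'))).length + 1)).length ≤ N := by
            simp only [List.length_drop]
            omega
          simp only [hterm, if_false, List.foldl_cons, hdw]
          rw [show ('"' :: (rest.takeWhile fun d => !(d = '"')) ++ ['"'])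
                = '"' :: ((rest.takeWhile fun d => !(d = '"')) ++ ['"']) from rfl,
              pvStepA_quote]
          exact ih _ hlen level ops
      · by_cases hl : c = '('
        · subst hl
          rw [pvTokenize, pvScanB]
          have hstep : pvStepA (level, ops) ['('] = (level + 1, ops) := by simp [pvStepA]
          simpa [pvSpecial, hstep] using ih rest hr (level + 1) ops
        · by_cases hrp : c = ')'
          · subst hrp
            rw [pvTokenize, pvScanB]
            have hstep : pvStepA (level, ops) [')'] = (level - 1, ops) := by simp [pvStepA]
            simpa [pvSpecial, hstep] using ih rest hr (level - 1) ops
          · by_cases hs : PySem.Chars.isspace c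
            · rw [pvTokenize, pvScanB]
              simpa [pvSpecial, hq, hl, hrp, hs] using ih rest hr level ops
            · -- word token
              rw [pvTokenize, pvScanB]
              have hspec : pvSpecial c = false := by simp [pvSpecial, hq, hl, hrp]
              have hpred : (fun d => !PySem.Chars.isspace d && !pvSpecial d)
                  = (fun d => !PySem.Chars.isspace d && !(d = '(' || d = ')' || d = '"')) := by
                funext d; simp [pvSpecial]
              simp only [hspec, hq, hl, hrp, hs, if_false, reduceIte, Bool.false_eq_true,
                List.foldl_cons, hpred]
              set w := rest.takeWhile (fun d => !PySem.Chars.isspace d && !(d = '(' || d = ')' || d = '"')) with hw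
              have hlen : (rest.drop w.length).length ≤ N := by
                simp only [List.length_drop]
                omega
              have hne1 : (c :: w) ≠ ['('] := by
                intro hcontra
                have : c = '(' := (List.cons_eq_cons.mp hcontra).1
                exact hl this
              have hne2 : (c :: w) ≠ [')'] := by
                intro hcontra
                have : c = ')' := (List.cons_eq_cons.mp hcontra).1
                exact hrp this
              by_cases hop : level = 0 ∧ PySem.Chars.upper (c :: w) ∈ ["AND".toList, "OR".toList, "NOT".toList]
              · have hstep : pvStepA (level, ops) (c :: w)
                    = (level, ops ++ [PySem.Chars.upper (c :: w)]) := by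
                  unfold pvStepA
                  rw [if_neg hne1, if_neg hne2, if_pos hop]
                rw [hstep, if_pos hop]
                have := ih (rest.drop w.length) hlen level (ops ++ [PySem.Chars.upper (c :: w)])
                simpa using this
              · have hstep : pvStepA (level, ops) (c :: w) = (level, ops) := by
                  unfold pvStepA
                  rw [if_neg hne1, if_neg hne2, if_neg hop]
                rw [hstep, if_neg hop]
                exact ih (rest.drop w.length) hlen level ops

-- ===== VERDICT (by name: the statement is the Claim_ definition above) =====
theorem has_only_two_top_level_operators_spec : Claim_equal_has_only_two_top_level_operators := by
  intro query _
  unfold Spec_has_only_two_top_level_operators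
  unfold has_only_two_top_level_operators has_only_two_top_level_operators_alt
  have := pv_key query.toList.length query.toList le_rfl 0 []
  simp only [List.length_nil] at this
  simp [this]
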